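-- pv_equiv track=rewrite | github.com/ivvas1/Pyth0n | 03.1.FunctionsStringsIO/count_util.py | count_util
-- ===== SOURCE A (Python) =====
-- import typing as tp
--
-- def count_util(text: str, flags: tp.Optional[str] = None) -> dict[str, int]:
--     """
--     :param text: text to count entities
--     :param flags: flags in command-like format - can be:
--         * -m stands for counting characters
--         * -l stands for counting lines
--         * -L stands for getting length of the longest line
--         * -w stands for counting words
--     More than one flag can be passed at the same time, for example:
--         * "-l -m"
--         * "-lLw"
--     Ommiting flags or passing empty string is equivalent to "-mlLw"
--     :return: mapping from string keys to corresponding counter, where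
--     keys are selected according to the received flags:
--         * "chars" - amount of characters
--         * "lines" - amount of lines
--         * "longest_line" - the longest line length
--         * "words" - amount of words
--     """
--     fm = False
--     fl = False
--     fL = False
--     fw = False
--     if flags is None or flags == "":
--         fm = True
--         fl = True
--         fL = True
--         fw = True
--     else:
--         for i in flags:
--             if i == "m":
--                 fm = True
--             if i == "l":
--                 fl = True
--             if i == "L":
--                 fL = True
--             if i == "w":
--                 fw = True
--     ans = dict()
--     if fm:
--         ans.fromkeys("chars")
--         ans["chars"] = len(text)
--     if fl:
--         ans.fromkeys("lines")
--         ans["lines"] = text.count("\n")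
--     if fw:
--         l = text.split()
--         ans.fromkeys("words")
--         ans["words"] = len(l)
--     if fL:
--         mx = 0
--         l = text.split("\n")
--         for i in l:
--             mx = max(mx, len(i))
--         ans.fromkeys("longest_line")
--         ans["longest_line"] = mx
--
--     return ans
-- ===== SOURCE B (Python) =====
-- import typing as tp
--
-- def count_util(text: str, flags: tp.Optional[str] = None) -> dict[str, int]:
--     sel = "mlLw" if not flags else flags
--     chars = lines = words = longest = cur = 0
--     in_word = False
--     for ch in text:
--         chars += 1
--         if ch == "\n":
--             lines += 1
--             if cur > longest:
--                 longest = cur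
--             cur = 0
--         else:
--             cur += 1
--         if ch.isspace():
--             in_word = False
--         elif not in_word:
--             words += 1
--             in_word = True
--     if cur > longest:
--         longest = cur
--     ans = {}
--     if "m" in sel:
--         ans["chars"] = chars
--     if "l" in sel:
--         ans["lines"] = lines
--     if "w" in sel:
--         ans["words"] = words
--     if "L" in sel:
--         ans["longest_line"] = longest
--     return ans
-- ===== Notes on version B (the rewrite author's own statement) =====
-- stated objective: alternative
-- what changed: Replaces A's per-metric passes (len, count('\n'), split(), a split('\n') max-loop) and its boolean flag-scanning loop by a single fused pass over the text that tracks chars, newline count, current/longest line length and whitespace-to-word transitions, with flag selection done by plain membership tests on the flag string.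
import Mathlib
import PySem

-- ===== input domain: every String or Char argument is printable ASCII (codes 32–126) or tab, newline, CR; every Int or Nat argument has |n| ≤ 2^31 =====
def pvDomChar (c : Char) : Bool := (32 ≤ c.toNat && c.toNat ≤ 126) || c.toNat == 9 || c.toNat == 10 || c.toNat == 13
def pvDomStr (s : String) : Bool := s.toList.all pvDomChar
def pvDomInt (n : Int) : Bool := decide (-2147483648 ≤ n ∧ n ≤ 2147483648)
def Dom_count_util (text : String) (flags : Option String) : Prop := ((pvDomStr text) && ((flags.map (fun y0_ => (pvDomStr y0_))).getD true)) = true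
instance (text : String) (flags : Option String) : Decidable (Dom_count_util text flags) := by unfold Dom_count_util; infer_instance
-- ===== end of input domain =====

-- B replaces A's four separate passes (len, count, split(), split('\n') loop) and its boolean
-- flag-scanning loop by one single pass over the text and membership tests on the flag string;
-- objective: alternative (a genuinely different one-pass decomposition, same asymptotic cost).

-- ===== PORT A =====
def count_util (text : String) (flags : Option String) : List (String × Int) :=
  -- fm/fl/fL/fw flag booleans, set by scanning `flags` char by char (branches in source order)
  let s0 : Bool × Bool × Bool × Bool := (false, false, false, false)
  let fs : Bool × Bool × Bool × Bool :=
    match flags with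
    | none => (true, true, true, true)
    | some f =>
      if f = "" then (true, true, true, true)
      else f.toList.foldl (fun (s : Bool × Bool × Bool × Bool) i =>
        let s := if i == 'm' then (true, s.2.1, s.2.2.1, s.2.2.2) else s
        let s := if i == 'l' then (s.1, true, s.2.2.1, s.2.2.2) else s
        let s := if i == 'L' then (s.1, s.2.1, true, s.2.2.2) else s
        let s := if i == 'w' then (s.1, s.2.1, s.2.2.1, true) else s
        s) s0
  let fm := fs.1; let fl := fs.2.1; let fL := fs.2.2.1; let fw := fs.2.2.2
  -- `ans.fromkeys(...)` in the source creates a new dict and discards it: a no-op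
  let ans : PySem.Dict String Int := PySem.Dict.empty
  let ans := if fm then ans.insert "chars" (PySem.Str.len text) else ans
  let ans := if fl then ans.insert "lines" ((PySem.Str.count text "\n" : Nat) : Int) else ans
  let ans := if fw then ans.insert "words" ((PySem.Str.split₀ text).length : Int) else ans
  let ans := if fL then
      -- text.split("\n"): sep is the nonempty literal "\n", so Chars.splitOn is exact here
      let l := PySem.Chars.splitOn text.toList ['\n']
      let mx : Int := l.foldl (fun mx i => max mx (PySem.Chars.len i)) 0
      ans.insert "longest_line" mx
    else ans
  ans.items

-- ===== PORT B =====
-- B's loop body, extracted as a named step function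
def stepB (st : Int × Int × Int × Int × Int × Bool) (ch : Char) : Int × Int × Int × Int × Int × Bool :=
  let (chars, lines, words, longest, cur, inw) := st
  let chars := chars + 1
  let (lines, longest, cur) :=
    if ch == '\n' then (lines + 1, if cur > longest then cur else longest, (0 : Int))
    else (lines, longest, cur + 1)
  let (words, inw) :=
    if PySem.Chars.isspace ch then (words, false)
    else if !inw then (words + 1, true) else (words, inw)
  (chars, lines, words, longest, cur, inw)

def count_util_alt (text : String) (flags : Option String) : List (String × Int) :=
  let sel : String := match flags with
    | none => "mlLw"
    | some f => if f = "" then "mlLw" else f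
  -- one pass: (chars, lines, words, longest, cur, in_word)
  let st : Int × Int × Int × Int × Int × Bool :=
    text.toList.foldl stepB (0, 0, 0, 0, 0, false)
  let longest := if st.2.2.2.2.1 > st.2.2.2.1 then st.2.2.2.2.1 else st.2.2.2.1
  let ans : PySem.Dict String Int := PySem.Dict.empty
  let ans := if PySem.Str.isIn "m" sel then ans.insert "chars" st.1 else ans
  let ans := if PySem.Str.isIn "l" sel then ans.insert "lines" st.2.1 else ans
  let ans := if PySem.Str.isIn "w" sel then ans.insert "words" st.2.2.1 else ans
  let ans := if PySem.Str.isIn "L" sel then ans.insert "longest_line" longest else ans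
  ans.items

-- ===== PRECONDITION & SPEC =====
def Spec_count_util (text : String) (flags : Option String) (out : List (String × Int)) : Prop := out = count_util_alt text flags
instance (text : String) (flags : Option String) (out : List (String × Int)) : Decidable (Spec_count_util text flags out) := by unfold Spec_count_util; infer_instance

-- ===== CLAIM (what is proved, stated in full; the proofs are below) =====
def Claim_equal_count_util : Prop := ∀ (text : String) (flags : Option String), Dom_count_util text flags → Spec_count_util text flags (count_util text flags)

-- ===== LEMMAS AND PROOFS =====

-- word count of B's pass: number of whitespace→non-whitespace transitions, `b` = currently inside a word
def wcF (b : Bool) : List Char → Nat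
  | [] => 0
  | c :: cs => if PySem.Chars.isspace c then wcF false cs
               else (if b then 0 else 1) + wcF true cs

-- length of the current (last) line after scanning, starting from partial length `cur`
def curF : List Char → Int → Int
  | [], cur => cur
  | c :: cs, cur => if c = '\n' then curF cs 0 else curF cs (cur + 1)

-- running maximum of completed-line lengths
def loF : List Char → Int → Int → Int
  | [], _, lo => lo
  | c :: cs, cur, lo => if c = '\n' then loF cs 0 (max lo cur) else loF cs (cur + 1) lo

-- in-word flag after scanning
def iwF (b : Bool) : List Char → Bool
  | [] => b
  | c :: cs => iwF (!PySem.Chars.isspace c) cs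

-- split on '\n' written as a plain forward recursion with an accumulated current piece
def splitNL (pre : List Char) : List Char → List (List Char)
  | [] => [pre]
  | c :: cs => if c = '\n' then pre :: splitNL [] cs else splitNL (pre ++ [c]) cs

lemma countGo_newline (l : List Char) : ∀ (fuel acc : Nat), l.length ≤ fuel →
    PySem.Chars.count.go ['\n'] fuel l acc = acc + l.countP (· == '\n') := by
  induction l with
  | nil => intro fuel acc _; cases fuel <;> simp [PySem.Chars.count.go]
  | cons c cs ih =>
    intro fuel acc h
    cases fuel with
    | zero => simp at h
    | succ n =>
      simp only [PySem.Chars.count.go, List.isPrefixOf, List.countP_cons]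
      by_cases hc : c = '\n'
      · subst hc; simp [ih n (acc + 1) (by simpa using h)]; omega
      · have : ('\n' == c) = false := by simpa using fun h' => hc h'.symm
        simp [this, ih n acc (by simpa using h), hc]

lemma count_newline (cs : List Char) :
    PySem.Chars.count cs ['\n'] = cs.countP (· == '\n') := by
  simp [PySem.Chars.count, countGo_newline cs cs.length 0 le_rfl]

lemma split0Go_length (l : List Char) : ∀ (cur : List Char) (acc : List (List Char)),
    (PySem.Chars.split₀.go l cur acc).length
      = acc.length + wcF (!cur.isEmpty) l + (if cur.isEmpty then 0 else 1) := by
  induction l with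
  | nil => intro cur acc; cases cur <;> simp [PySem.Chars.split₀.go, wcF]
  | cons c cs ih =>
    intro cur acc
    simp only [PySem.Chars.split₀.go]
    by_cases hs : PySem.Chars.isspace c
    · cases cur <;> simp [hs, ih, wcF] <;> omega
    · cases cur <;> simp [hs, ih, wcF] <;> omega

lemma split0_length (cs : List Char) :
    (PySem.Chars.split₀ cs).length = wcF false cs := by
  simp [PySem.Chars.split₀, split0Go_length cs [] []]

lemma splitOnGo_newline (l : List Char) : ∀ (fuel : Nat) (cur : List Char) (acc : List (List Char)),
    l.length ≤ fuel →
    PySem.Chars.splitOn.go ['\n'] fuel l cur acc = acc.reverse ++ splitNL cur.reverse l := by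
  induction l with
  | nil => intro fuel cur acc _; cases fuel <;> simp [PySem.Chars.splitOn.go, splitNL]
  | cons c cs ih =>
    intro fuel cur acc h
    cases fuel with
    | zero => simp at h
    | succ n =>
      simp only [PySem.Chars.splitOn.go, List.isPrefixOf]
      by_cases hc : c = '\n'
      · subst hc
        simp [ih n [] (cur.reverse :: acc) (by simpa using h), splitNL]
      · have : ('\n' == c) = false := by simpa using fun h' => hc h'.symm
        simp [this, ih n (c :: cur) acc (by simpa using h), splitNL, hc]

lemma splitOn_newline (cs : List Char) :
    PySem.Chars.splitOn cs ['\n'] = splitNL [] cs := by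
  simpa using splitOnGo_newline cs (cs.length + 1) [] [] (by omega)

lemma foldl_max_splitNL (cs : List Char) : ∀ (pre : List Char) (m0 : Int),
    (splitNL pre cs).foldl (fun mx i => max mx (PySem.Chars.len i)) m0
      = max (loF cs (pre.length : Int) m0) (curF cs (pre.length : Int)) := by
  induction cs with
  | nil => intro pre m0; simp [splitNL, loF, curF, PySem.Chars.len_eq]
  | cons c cs ih =>
    intro pre m0
    by_cases hc : c = '\n'
    · subst hc
      simp only [splitNL, if_pos rfl, loF, curF, List.foldl_cons]
      simpa [PySem.Chars.len_eq] using ih [] (max m0 (pre.length : Int))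
    · simp only [splitNL, if_neg hc, loF, curF, hc, if_false]
      have := ih (pre ++ [c]) m0
      simpa [List.length_append, Int.add_comm, push_cast] using this

lemma foldB_invariant (cs : List Char) :
    ∀ (chars lines words longest cur : Int) (inw : Bool),
    cs.foldl stepB (chars, lines, words, longest, cur, inw)
      = (chars + cs.length, lines + cs.countP (· == '\n'), words + wcF inw cs,
         loF cs cur longest, curF cs cur, iwF inw cs) := by
  induction cs with
  | nil => intro chars lines words longest cur inw; simp [wcF, loF, curF, iwF]
  | cons c cs ih =>
    intro chars lines words longest cur inw
    have hmax : (if cur > longest then cur else longest) = max longest cur := by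
      split_ifs <;> omega
    simp only [List.foldl_cons, stepB, List.countP_cons, wcF, loF, curF, iwF]
    by_cases hc : c = '\n'
    · have hsp : PySem.Chars.isspace c = true := by subst hc; decide
      subst hc
      simp [hsp, hmax, ih, Prod.ext_iff] <;> omega
    · have hne : (c == '\n') = false := by simpa using hc
      by_cases hsp : PySem.Chars.isspace c
      · simp [hne, hsp, ih, hc, Prod.ext_iff] <;> omega
      · have hsp' : PySem.Chars.isspace c = false := by simpa using hsp
        cases inw <;> simp [hne, hsp', ih, hc, wcF, Prod.ext_iff] <;> omega

-- A's flag fold computes plain membership of each flag character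
lemma flagFold (cs : List Char) : ∀ (s : Bool × Bool × Bool × Bool),
    cs.foldl (fun (s : Bool × Bool × Bool × Bool) i =>
        let s := if i == 'm' then (true, s.2.1, s.2.2.1, s.2.2.2) else s
        let s := if i == 'l' then (s.1, true, s.2.2.1, s.2.2.2) else s
        let s := if i == 'L' then (s.1, s.2.1, true, s.2.2.2) else s
        let s := if i == 'w' then (s.1, s.2.1, s.2.2.1, true) else s
        s) s
      = (s.1 || cs.contains 'm', s.2.1 || cs.contains 'l',
         s.2.2.1 || cs.contains 'L', s.2.2.2 || cs.contains 'w') := by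
  induction cs with
  | nil => intro s; simp
  | cons c cs ih =>
    intro s
    simp only [List.foldl_cons, List.contains_cons, ih]
    by_cases hm : c = 'm' <;> by_cases hl : c = 'l' <;> by_cases hL : c = 'L' <;>
      by_cases hw : c = 'w' <;>
      simp_all <;>
      simp [show ('m' == c) = false by simpa using fun h => hm h.symm,
            show ('l' == c) = false by simpa using fun h => hl h.symm,
            show ('L' == c) = false by simpa using fun h => hL h.symm,
            show ('w' == c) = false by simpa using fun h => hw h.symm]

lemma isIn_singleton (c : Char) (l : List Char) :
    PySem.Chars.isIn [c] l = l.contains c := by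
  by_cases h : c ∈ l
  · obtain ⟨s, t, rfl⟩ := List.append_of_mem h
    rw [(PySem.Chars.isIn_iff_infix [c] _).2 ⟨s, t, by simp⟩]
    simp [h]
  · have hni : ¬ ([c] <:+: l) := fun hi => h (hi.mem (by simp))
    rw [(PySem.Chars.isIn_eq_false_iff [c] l).2 hni]
    simpa using h

-- the two dicts are built identically once flags and the four counters agree
lemma count_util_eq (text : String) (flags : Option String) :
    count_util text flags = count_util_alt text flags := by
  have hnl : ("\n" : String).toList = ['\n'] := rfl
  have hcount : ((PySem.Str.count text "\n" : Nat) : Int)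
      = ((text.toList.countP (· == '\n') : Nat) : Int) := by
    rw [PySem.Str.count_eq, hnl, count_newline]
  have hwords : ((PySem.Str.split₀ text).length : Int) = ((wcF false text.toList : Nat) : Int) := by
    rw [← split0_length text.toList, ← PySem.Str.split₀_map_toList, List.length_map]
  have hmax : (PySem.Chars.splitOn text.toList ['\n']).foldl
        (fun mx i => max mx (PySem.Chars.len i)) 0
      = max (loF text.toList 0 0) (curF text.toList 0) := by
    rw [splitOn_newline]; simpa using foldl_max_splitNL text.toList [] 0
  have hfold := foldB_invariant text.toList 0 0 0 0 0 false
  have hfin : (if curF text.toList 0 > loF text.toList 0 0 then curF text.toList 0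
      else loF text.toList 0 0) = max (loF text.toList 0 0) (curF text.toList 0) := by
    split_ifs <;> omega
  match flags with
  | none =>
    simp only [count_util, count_util_alt, hfold, PySem.Str.len_eq, hcount, hwords, hmax]
    rw [show PySem.Str.isIn "m" "mlLw" = true from rfl,
        show PySem.Str.isIn "l" "mlLw" = true from rfl,
        show PySem.Str.isIn "w" "mlLw" = true from rfl,
        show PySem.Str.isIn "L" "mlLw" = true from rfl]
    simp [hfin, Int.zero_add]
  | some f =>
    by_cases hf : f = ""
    · subst hf
      simp only [count_util, count_util_alt, hfold, PySem.Str.len_eq, hcount,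
        hwords, hmax, reduceIte]
      rw [show PySem.Str.isIn "m" "mlLw" = true from rfl,
          show PySem.Str.isIn "l" "mlLw" = true from rfl,
          show PySem.Str.isIn "w" "mlLw" = true from rfl,
          show PySem.Str.isIn "L" "mlLw" = true from rfl]
      simp [hfin, Int.zero_add]
    · have hm : PySem.Str.isIn "m" f = f.toList.contains 'm' := by
        rw [PySem.Str.isIn_eq]; exact isIn_singleton 'm' f.toList
      have hl : PySem.Str.isIn "l" f = f.toList.contains 'l' := by
        rw [PySem.Str.isIn_eq]; exact isIn_singleton 'l' f.toList
      have hL : PySem.Str.isIn "L" f = f.toList.contains 'L' := by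
        rw [PySem.Str.isIn_eq]; exact isIn_singleton 'L' f.toList
      have hw : PySem.Str.isIn "w" f = f.toList.contains 'w' := by
        rw [PySem.Str.isIn_eq]; exact isIn_singleton 'w' f.toList
      simp only [count_util, count_util_alt, if_neg hf, flagFold, hfold, PySem.Str.len_eq,
        hcount, hwords, hmax, hm, hl, hL, hw, Bool.false_or]
      simp [hfin, Int.zero_add]

-- ===== VERDICT (by name: the statement is the Claim_ definition above) =====
theorem count_util_spec : Claim_equal_count_util := by
  intro text flags _
  unfold Spec_count_util
  exact count_util_eq text flags
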